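-- pv_equiv track=rewrite | github.com/xRaw27/ADPTO_WIET_2023 | lab4/solver1.py | simplify_clause
-- ===== SOURCE A (Python) =====
-- def simplify_clause(C, V):
--     # C - klauzula, czyli lista literałów
--     # V - wartościowanie zmiennych
--
--     simplified_C = []
--     for v in C:
--         val = V.get(v, 0)
--         if val == 0:
--             simplified_C.append(v)
--         elif val == 1:
--             return None
--     return simplified_C
-- ===== SOURCE B (Python) =====
-- def simplify_clause(C, V):
--     # Index the valuation once: sat = variables set to 1, assigned = variables
--     # with any non-zero value.  A satisfied literal is then a set-disjointness
--     # test, and the surviving literals are a membership filter.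
--     sat = set()
--     assigned = set()
--     for v, val in V.items():
--         if val == 1:
--             sat.add(v)
--         if val != 0:
--             assigned.add(v)
--     if sat.isdisjoint(C):
--         return [v for v in C if v not in assigned]
--     return None
-- ===== Notes on version B (the rewrite author's own statement) =====
-- stated objective: alternative
-- what changed: B builds two sets (satisfied and assigned variables) in one pass over the valuation V, then answers by a set-disjointness test against C and a set-membership filter, replacing A's fused per-literal dict-lookup loop with accumulator and early return.
import Mathlib
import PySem

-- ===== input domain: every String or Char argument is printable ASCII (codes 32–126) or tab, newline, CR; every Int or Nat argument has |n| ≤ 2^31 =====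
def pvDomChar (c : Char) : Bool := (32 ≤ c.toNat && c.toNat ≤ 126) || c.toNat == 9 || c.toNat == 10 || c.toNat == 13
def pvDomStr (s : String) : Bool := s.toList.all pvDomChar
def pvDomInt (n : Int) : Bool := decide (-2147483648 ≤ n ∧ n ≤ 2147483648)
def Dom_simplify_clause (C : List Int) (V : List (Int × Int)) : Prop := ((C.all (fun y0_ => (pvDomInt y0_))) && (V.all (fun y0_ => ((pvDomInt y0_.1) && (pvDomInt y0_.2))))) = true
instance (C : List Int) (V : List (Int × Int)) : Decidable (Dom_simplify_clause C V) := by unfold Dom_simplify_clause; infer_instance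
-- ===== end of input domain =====

-- B indexes the valuation V once into two sets (sat = value 1, assigned = value ≠ 0), then
-- decides by a set-disjointness test and a membership filter, instead of A's fused accumulator
-- loop with a per-literal dict lookup and an early return (objective: alternative).


-- ===== PORT A =====
-- A's loop: accumulator simplified_C, early return None on a satisfied literal
def simplify_clause_go (V : List (Int × Int)) : List Int → List Int → Option (List Int)
  | [], acc => some acc
  | v :: rest, acc =>
    let val := PySem.Dict.getD (PySem.Dict.mk V) v (0:Int)
    if val == 0 then simplify_clause_go V rest (acc ++ [v])
    else if val == 1 then none
    else simplify_clause_go V rest acc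

def simplify_clause (C : List Int) (V : List (Int × Int)) : Option (List Int) :=
  simplify_clause_go V C []

-- ===== PORT B =====
-- B's loop body: add the key to sat if its value is 1, to assigned if its value is non-zero
def sets_step (p : PySem.Set Int × PySem.Set Int) (kv : Int × Int) :
    PySem.Set Int × PySem.Set Int :=
  (if kv.2 == 1 then PySem.Set.add p.1 kv.1 else p.1,
   if kv.2 != 0 then PySem.Set.add p.2 kv.1 else p.2)

-- B's single pass over V.items() building (sat, assigned)
def build_sets (items : List (Int × Int)) : PySem.Set Int × PySem.Set Int :=
  items.foldl sets_step (PySem.Set.empty, PySem.Set.empty)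

def simplify_clause_alt (C : List Int) (V : List (Int × Int)) : Option (List Int) :=
  let sets := build_sets (PySem.Dict.mk V).items
  if PySem.Set.isdisjoint sets.1 C then
    some (C.filter (fun v => !(PySem.Set.contains sets.2 v)))
  else none

-- ===== PRECONDITION & SPEC =====
-- Pre_ excludes association lists V with duplicate keys: V stands for a Python dict, which
-- cannot hold duplicate keys, so which occurrence the list encoding keeps is an accidental
-- first-vs-last-match corner of the encoding, not a behaviour of either Python program.
def Pre_simplify_clause (C : List Int) (V : List (Int × Int)) : Prop :=
  (V.map Prod.fst).Nodup
instance (C : List Int) (V : List (Int × Int)) : Decidable (Pre_simplify_clause C V) := by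
  unfold Pre_simplify_clause; infer_instance

def pvWitness_simplify_clause : List Int × (List (Int × Int)) :=
  ([1, 2, 3], [(2, 1), (3, -1)])

def Spec_simplify_clause (C : List Int) (V : List (Int × Int)) (out : Option (List Int)) : Prop := out = simplify_clause_alt C V
instance (C : List Int) (V : List (Int × Int)) (out : Option (List Int)) : Decidable (Spec_simplify_clause C V out) := by unfold Spec_simplify_clause; infer_instance

-- ===== CLAIM (what is proved, stated in full; the proofs are below) =====
def Claim_equal_simplify_clause : Prop := ∀ (C : List Int) (V : List (Int × Int)), Dom_simplify_clause C V → Pre_simplify_clause C V → Spec_simplify_clause C V (simplify_clause C V)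

-- ===== LEMMAS AND PROOFS =====
-- membership in the two sets of B's fold, over any starting pair
theorem mem_fold_sets (l : List (Int × Int)) (s : PySem.Set Int × PySem.Set Int) (x : Int) :
    (x ∈ (l.foldl sets_step s).1 ↔ x ∈ s.1 ∨ (x, (1:Int)) ∈ l) ∧
    (x ∈ (l.foldl sets_step s).2 ↔ x ∈ s.2 ∨ ∃ w, (x, w) ∈ l ∧ w ≠ 0) := by
  induction l generalizing s with
  | nil => simp
  | cons kv rest ih =>
    obtain ⟨k, w⟩ := kv
    simp only [List.foldl_cons]
    constructor
    · rw [(ih (sets_step s (k, w))).1]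
      by_cases h1 : w = 1 <;>
        · simp [sets_step, h1, PySem.Set.mem_add, Prod.ext_iff]
          tauto
    · rw [(ih (sets_step s (k, w))).2]
      by_cases h0 : w = 0 <;>
        · simp [sets_step, h0, PySem.Set.mem_add, Prod.ext_iff]
          constructor <;> rintro (h | ⟨u, hu, hne⟩)
          all_goals try exact Or.inl h
          all_goals try aesop
  
theorem mem_build_sets_fst (l : List (Int × Int)) (x : Int) :
    x ∈ (build_sets l).1 ↔ (x, (1:Int)) ∈ l := by
  unfold build_sets
  rw [(mem_fold_sets l _ x).1]
  simp [PySem.Set.empty]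

theorem mem_build_sets_snd (l : List (Int × Int)) (x : Int) :
    x ∈ (build_sets l).2 ↔ ∃ w, (x, w) ∈ l ∧ w ≠ 0 := by
  unfold build_sets
  rw [(mem_fold_sets l _ x).2]
  simp [PySem.Set.empty]

-- lookup in (Dict.mk V) characterised by membership in V, under unique keys
theorem getD_mk_eq_iff (V : List (Int × Int)) (hnd : (V.map Prod.fst).Nodup) (x w : Int)
    (hw : w ≠ 0) :
    PySem.Dict.getD (PySem.Dict.mk V) x 0 = w ↔ (x, w) ∈ V := by
  have hk : (PySem.Dict.mk V).keys.Nodup := by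
    simpa [PySem.Dict.keys_mk] using hnd
  rw [PySem.Dict.getD_eq_get?_getD]
  constructor
  · intro h
    cases hg : (PySem.Dict.mk V).get? x with
    | none => rw [hg] at h; simp at h; exact absurd h.symm hw
    | some u =>
      rw [hg] at h; simp at h; subst h
      exact PySem.Dict.mem_items_of_get?_eq_some _ hg
  · intro h
    have : (PySem.Dict.mk V).get? x = some w :=
      (PySem.Dict.get?_eq_some_iff_mem_items _ x w hk).2 h
    simp [this]

theorem getD_mk_ne_zero_iff (V : List (Int × Int)) (hnd : (V.map Prod.fst).Nodup) (x : Int) :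
    PySem.Dict.getD (PySem.Dict.mk V) x 0 ≠ 0 ↔ ∃ w, (x, w) ∈ V ∧ w ≠ 0 := by
  constructor
  · intro h
    exact ⟨_, (getD_mk_eq_iff V hnd x _ h).1 rfl, h⟩
  · rintro ⟨w, hw, hne⟩
    rw [(getD_mk_eq_iff V hnd x w hne).2 hw]
    exact hne

-- A's loop, closed form
theorem simplify_clause_go_eq (V : List (Int × Int)) (C acc : List Int) :
    simplify_clause_go V C acc =
      if C.any (fun v => PySem.Dict.getD (PySem.Dict.mk V) v (0:Int) == 1) then none
      else some (acc ++ C.filter (fun v => PySem.Dict.getD (PySem.Dict.mk V) v (0:Int) == 0)) := by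
  induction C generalizing acc with
  | nil => simp [simplify_clause_go]
  | cons v rest ih =>
    simp only [simplify_clause_go, List.any_cons, List.filter_cons]
    by_cases h0 : PySem.Dict.getD (PySem.Dict.mk V) v (0:Int) = 0
    · simp [h0, ih, List.append_assoc]
    · by_cases h1 : PySem.Dict.getD (PySem.Dict.mk V) v (0:Int) = 1
      · simp [h1]
      · simp [h0, h1, ih]

-- B, closed form (under unique keys in V)
theorem simplify_clause_alt_eq (C : List Int) (V : List (Int × Int))
    (hnd : (V.map Prod.fst).Nodup) :
    simplify_clause_alt C V =
      if C.any (fun v => PySem.Dict.getD (PySem.Dict.mk V) v (0:Int) == 1) then none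
      else some (C.filter (fun v => PySem.Dict.getD (PySem.Dict.mk V) v (0:Int) == 0)) := by
  have hsat : ∀ x : Int, x ∈ (build_sets (PySem.Dict.mk V).items).1 ↔
      PySem.Dict.getD (PySem.Dict.mk V) x 0 = 1 := by
    intro x
    rw [mem_build_sets_fst]
    exact (getD_mk_eq_iff V hnd x 1 one_ne_zero).symm
  have hasg : ∀ x : Int, x ∈ (build_sets (PySem.Dict.mk V).items).2 ↔
      PySem.Dict.getD (PySem.Dict.mk V) x 0 ≠ 0 := by
    intro x
    rw [mem_build_sets_snd]
    exact (getD_mk_ne_zero_iff V hnd x).symm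
  show (if PySem.Set.isdisjoint (build_sets (PySem.Dict.mk V).items).1 C then
      some (C.filter (fun v => !(PySem.Set.contains (build_sets (PySem.Dict.mk V).items).2 v)))
    else none) = _
  by_cases hany : (C.any fun v => PySem.Dict.getD (PySem.Dict.mk V) v (0:Int) == 1) = true
  · obtain ⟨v, hvC, hv1⟩ := List.any_eq_true.1 hany
    have hd : PySem.Set.isdisjoint (build_sets (PySem.Dict.mk V).items).1 C = false := by
      rw [← Bool.not_eq_true]
      intro h
      exact (PySem.Set.isdisjoint_iff _ _).1 h v ((hsat v).2 (by simpa using hv1)) hvC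
    simp [hany, hd]
  · have hd : PySem.Set.isdisjoint (build_sets (PySem.Dict.mk V).items).1 C = true := by
      rw [PySem.Set.isdisjoint_iff]
      intro x hx hxC
      exact hany (List.any_eq_true.2 ⟨x, hxC, by simp [(hsat x).1 hx]⟩)
    simp only [hd, if_true, hany, if_false, Bool.false_eq_true]
    congr 1
    refine (List.filter_congr ?_).symm
    intro v _
    have hm := hasg v
    rw [← PySem.Set.contains_iff] at hm
    cases hcb : PySem.Set.contains (build_sets (PySem.Dict.mk V).items).2 v
    · rw [hcb] at hm; simp at hm; simp [hm]
    · rw [hcb] at hm; simp at hm; simp [hm]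

-- ===== VERDICT (by name: the statement is the Claim_ definition above) =====
theorem simplify_clause_spec : Claim_equal_simplify_clause := by
  intro C V _ hpre
  have hnd : (V.map Prod.fst).Nodup := hpre
  unfold Spec_simplify_clause simplify_clause
  rw [simplify_clause_go_eq, simplify_clause_alt_eq C V hnd]
  simp
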